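-- pv_equiv track=rewrite | github.com/mjhopkins88-oss/btr-prospecting | workers/predictions/timeline_estimator.py | estimate_timeline_from_events
-- ===== SOURCE A (Python) =====
-- STAGE_TIMELINES = {
--     'LLC_CREATION':       (12, 18),
--     'LAND_PURCHASE':      (9, 15),
--     'ZONING_CASE':        (6, 12),
--     'SUBDIVISION_PLAT':   (4, 8),
--     'PERMIT_APPLICATION': (2, 4),
--     'CONTRACTOR_BID':     (1, 3),
--     'NEWS_MENTION':       (3, 12),  # too vague for tight estimate
-- }
--
-- STAGE_ORDER = [
--     'CONTRACTOR_BID',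
--     'PERMIT_APPLICATION',
--     'SUBDIVISION_PLAT',
--     'ZONING_CASE',
--     'LAND_PURCHASE',
--     'LLC_CREATION',
--     'NEWS_MENTION',
-- ]
--
-- def estimate_timeline_from_events(event_types):
--     """
--     Given a list/set of event type strings, return the timeline estimate.
--     Useful when you already have the event types and don't want a DB query.
--     """
--     if not event_types:
--         return None
--
--     types_set = set(event_types) if not isinstance(event_types, set) else event_types
--
--     for stage in STAGE_ORDER:
--         if stage in types_set:
--             low, high = STAGE_TIMELINES[stage]
--             return f"Construction likely in {low}-{high} months"
--
--     return None
-- ===== SOURCE B (Python) =====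
-- STAGE_TIMELINES = {
--     'LLC_CREATION':       (12, 18),
--     'LAND_PURCHASE':      (9, 15),
--     'ZONING_CASE':        (6, 12),
--     'SUBDIVISION_PLAT':   (4, 8),
--     'PERMIT_APPLICATION': (2, 4),
--     'CONTRACTOR_BID':     (1, 3),
--     'NEWS_MENTION':       (3, 12),
-- }
--
-- STAGE_ORDER = [
--     'CONTRACTOR_BID',
--     'PERMIT_APPLICATION',
--     'SUBDIVISION_PLAT',
--     'ZONING_CASE',
--     'LAND_PURCHASE',
--     'LLC_CREATION',
--     'NEWS_MENTION',
-- ]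
--
-- def estimate_timeline_from_events(event_types):
--     rank = {stage: i for i, stage in enumerate(STAGE_ORDER)}
--     ranks = [rank[t] for t in event_types if t in rank]
--     if not ranks:
--         return None
--     low, high = STAGE_TIMELINES[STAGE_ORDER[min(ranks)]]
--     return f"Construction likely in {low}-{high} months"
-- ===== Notes on version B (the rewrite author's own statement) =====
-- stated objective: alternative
-- what changed: Instead of scanning the fixed STAGE_ORDER and membership-testing a set built from the input, B builds a rank index once, maps the input events to their ranks in a single pass, and selects the stage of the minimal rank.
import Mathlib
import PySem

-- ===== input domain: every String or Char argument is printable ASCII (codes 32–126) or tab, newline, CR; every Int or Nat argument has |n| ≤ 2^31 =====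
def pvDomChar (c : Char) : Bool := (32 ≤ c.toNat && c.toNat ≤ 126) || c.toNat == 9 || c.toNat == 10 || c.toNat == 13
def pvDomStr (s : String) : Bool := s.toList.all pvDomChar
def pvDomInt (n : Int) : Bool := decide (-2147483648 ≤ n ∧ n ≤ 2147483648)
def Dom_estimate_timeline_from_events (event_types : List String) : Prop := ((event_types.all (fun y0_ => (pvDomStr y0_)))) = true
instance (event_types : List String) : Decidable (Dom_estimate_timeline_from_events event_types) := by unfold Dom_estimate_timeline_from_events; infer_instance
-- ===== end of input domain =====

-- B replaces A's scan of STAGE_ORDER (with set-membership tests) by mapping the input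
-- events to ranks through a prebuilt index and picking the minimal rank (objective: alternative).

-- ===== PORT A =====
def pvStageTimelines : PySem.Dict String (Int × Int) := PySem.Dict.ofList
  [("LLC_CREATION", (12, 18)), ("LAND_PURCHASE", (9, 15)), ("ZONING_CASE", (6, 12)),
   ("SUBDIVISION_PLAT", (4, 8)), ("PERMIT_APPLICATION", (2, 4)), ("CONTRACTOR_BID", (1, 3)),
   ("NEWS_MENTION", (3, 12))]

def pvStageOrder : List String :=
  ["CONTRACTOR_BID", "PERMIT_APPLICATION", "SUBDIVISION_PLAT", "ZONING_CASE",
   "LAND_PURCHASE", "LLC_CREATION", "NEWS_MENTION"]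

def pvFmt (low high : Int) : String :=
  "Construction likely in " ++ PySem.Int.toStr low ++ "-" ++ PySem.Int.toStr high ++ " months"

-- the 'for stage in STAGE_ORDER' loop; the 'none' on a missing STAGE_TIMELINES key is
-- unreachable (every stage of pvStageOrder is a key of pvStageTimelines)
def pvScan (stages : List String) (types_set : PySem.Set String) : Option String :=
  match stages with
  | [] => none
  | stage :: rest =>
    if PySem.Set.contains types_set stage then
      match PySem.Dict.get? pvStageTimelines stage with
      | some (low, high) => some (pvFmt low high)
      | none => none
    else pvScan rest types_set

def estimate_timeline_from_events (event_types : List String) : Option String :=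
  if event_types = [] then none
  else pvScan pvStageOrder (PySem.Set.ofList event_types)

-- ===== PORT B =====
def pvRank : PySem.Dict String Int :=
  (PySem.List.enumerate pvStageOrder).foldl (fun d p => PySem.Dict.insert d p.2 p.1) PySem.Dict.empty

def estimate_timeline_from_events_alt (event_types : List String) : Option String :=
  let ranks := event_types.filterMap (fun t => PySem.Dict.get? pvRank t)
  match PySem.List.min? ranks (fun x => x) with
  | none => none
  | some k =>
    match PySem.List.pyGet? pvStageOrder k with
    | none => none   -- unreachable: the minimal rank indexes pvStageOrder
    | some stage =>
      match PySem.Dict.get? pvStageTimelines stage with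
      | some (low, high) => some (pvFmt low high)
      | none => none   -- unreachable: every stage is a key

-- ===== PRECONDITION & SPEC =====
def Spec_estimate_timeline_from_events (event_types : List String) (out : Option String) : Prop := out = estimate_timeline_from_events_alt event_types
instance (event_types : List String) (out : Option String) : Decidable (Spec_estimate_timeline_from_events event_types out) := by unfold Spec_estimate_timeline_from_events; infer_instance

-- ===== CLAIM (what is proved, stated in full; the proofs are below) =====
def Claim_equal_estimate_timeline_from_events : Prop := ∀ (event_types : List String), Dom_estimate_timeline_from_events event_types → Spec_estimate_timeline_from_events event_types (estimate_timeline_from_events event_types)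

-- ===== LEMMAS AND PROOFS =====

theorem rank_some (t : String) (k : Int) (h : PySem.Dict.get? pvRank t = some k) :
    (k = 0 ∧ t = "CONTRACTOR_BID") ∨ (k = 1 ∧ t = "PERMIT_APPLICATION") ∨
    (k = 2 ∧ t = "SUBDIVISION_PLAT") ∨ (k = 3 ∧ t = "ZONING_CASE") ∨
    (k = 4 ∧ t = "LAND_PURCHASE") ∨ (k = 5 ∧ t = "LLC_CREATION") ∨
    (k = 6 ∧ t = "NEWS_MENTION") := by
  have hr : pvRank = PySem.Dict.mk [("CONTRACTOR_BID",0),("PERMIT_APPLICATION",1),("SUBDIVISION_PLAT",2),("ZONING_CASE",3),("LAND_PURCHASE",4),("LLC_CREATION",5),("NEWS_MENTION",6)] := by decide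
  rw [hr] at h
  simp only [PySem.Dict.get?_mk_cons] at h
  split_ifs at h <;> simp_all [PySem.Dict.get?]

theorem scontains (l : List String) (x : String) :
    PySem.Set.contains (PySem.Set.ofList l) x = l.contains x := by
  by_cases h : x ∈ l <;>
    simp [PySem.Set.mem_ofList, h]

theorem timeline_equal : ∀ (l : List String),
    estimate_timeline_from_events l = estimate_timeline_from_events_alt l := by
  intro l
  simp only [estimate_timeline_from_events, estimate_timeline_from_events_alt]
  cases hmin : PySem.List.min? (l.filterMap (fun t => PySem.Dict.get? pvRank t)) (fun x => x) with
  | none =>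
    have hnil : l.filterMap (fun t => PySem.Dict.get? pvRank t) = [] :=
      (PySem.List.min?_eq_none_iff _ _).mp hmin
    have hno : ∀ t ∈ l, PySem.Dict.get? pvRank t = none := by
      intro t ht
      cases hg : PySem.Dict.get? pvRank t with
      | none => rfl
      | some k =>
        exact absurd (List.mem_filterMap.mpr ⟨t, ht, hg⟩) (by simp [hnil])
    have hmem : ∀ s ∈ pvStageOrder, s ∉ l := by
      intro s hs hsl
      have := hno s hsl
      fin_cases hs <;> simp [pvRank] at this <;> revert this <;> decide
    by_cases hl : l = []
    · simp [hl]
    · simp only [if_neg hl]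
      simp [pvScan, pvStageOrder,
        hmem "CONTRACTOR_BID" (by simp [pvStageOrder]),
        hmem "PERMIT_APPLICATION" (by simp [pvStageOrder]),
        hmem "SUBDIVISION_PLAT" (by simp [pvStageOrder]),
        hmem "ZONING_CASE" (by simp [pvStageOrder]),
        hmem "LAND_PURCHASE" (by simp [pvStageOrder]),
        hmem "LLC_CREATION" (by simp [pvStageOrder]),
        hmem "NEWS_MENTION" (by simp [pvStageOrder])]
  | some k =>
    have hkmem : k ∈ l.filterMap (fun t => PySem.Dict.get? pvRank t) := PySem.List.min?_mem hmin
    have hkmin : ∀ y ∈ l.filterMap (fun t => PySem.Dict.get? pvRank t), k ≤ y :=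
      PySem.List.min?_isMin hmin
    have hnotin : ∀ (name : String) (j : Int), PySem.Dict.get? pvRank name = some j → j < k →
        name ∉ l := by
      intro name j hg hj hin
      exact absurd (hkmin j (List.mem_filterMap.mpr ⟨name, hin, hg⟩)) (by omega)
    obtain ⟨t, htl, htk⟩ := List.mem_filterMap.mp hkmem
    have hl : l ≠ [] := by rintro rfl; simp at htl
    rcases rank_some t k htk with ⟨rfl, rfl⟩|⟨rfl, rfl⟩|⟨rfl, rfl⟩|⟨rfl, rfl⟩|⟨rfl, rfl⟩|⟨rfl, rfl⟩|⟨rfl, rfl⟩ <;>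
      simp only [if_neg hl, pvScan, pvStageOrder, scontains, List.contains_eq_mem] <;>
      simp [htl,
        hnotin "CONTRACTOR_BID" 0 (by decide),
        hnotin "PERMIT_APPLICATION" 1 (by decide),
        hnotin "SUBDIVISION_PLAT" 2 (by decide),
        hnotin "ZONING_CASE" 3 (by decide),
        hnotin "LAND_PURCHASE" 4 (by decide),
        hnotin "LLC_CREATION" 5 (by decide),
        PySem.List.pyGet?, PySem.List.pyIdx?, pvStageTimelines, PySem.Dict.get?]

-- ===== VERDICT (by name: the statement is the Claim_ definition above) =====
theorem estimate_timeline_from_events_spec : Claim_equal_estimate_timeline_from_events := by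
  intro l _
  exact timeline_equal l
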